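-- pv_equiv track=rewrite | github.com/pypi-data/pypi-mirror-397 | packages/ctao-bdms-rucio-policy/ctao_bdms_rucio_policy-0.2.2.tar.gz/ctao_bdms_rucio_policy-0.2.2/src/bdms_rucio_policy/scope.py | scope
-- ===== SOURCE A (Python) =====
-- from collections.abc import Sequence
-- from typing import Optional
--
-- def scope(did: str, scopes: Optional[Sequence[str]]) -> tuple[str, str]:
--     """Scope extraction algorithm for CTAO.
--
--     Assumes LFNs of the form ``/<VO Name>/<scope>/<path>``.
--     """
--     msg = f"DID {did!r} does not match expected schema: /<VO Name>/<scope>/<path>."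
--     if not did.startswith("/"):
--         raise ValueError(msg)
--
--     components = [comp for comp in did.split("/") if comp != ""]
--
--     # if no "scope" is in the did, e.g. it's just the vo or another path
--     # we return the special "root" scope. Needed as the DIRAC integration
--     # needs a container to exist with DID /<VO> and that should belong to
--     # the scope "root" owned by the admin user.
--     if len(components) < 2:
--         return "root", did
--
--     return components[1], did
-- ===== SOURCE B (Python) =====
-- def scope(did, scopes):
--     """Scope extraction: single left-to-right index scan instead of
--     split/filter/index — finds the second slash-separated component directly."""
--     msg = f"DID {did!r} does not match expected schema: /<VO Name>/<scope>/<path>."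
--     if not did.startswith("/"):
--         raise ValueError(msg)
--     n = len(did)
--     i = 0
--     while i < n and did[i] == "/":   # skip leading slashes
--         i += 1
--     while i < n and did[i] != "/":   # skip first component
--         i += 1
--     while i < n and did[i] == "/":   # skip separator slashes
--         i += 1
--     j = i
--     while j < n and did[j] != "/":   # second component is did[i:j]
--         j += 1
--     if i == j:
--         return "root", did
--     return did[i:j], did
-- ===== Notes on version B (the rewrite author's own statement) =====
-- stated objective: alternative
-- what changed: Replaces split-on-'/' + filter-empty + length-check/index with a single left-to-right scan that skips leading slashes, skips the first component and the separator run, and slices the second component directly, never building a component list.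
import Mathlib
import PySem

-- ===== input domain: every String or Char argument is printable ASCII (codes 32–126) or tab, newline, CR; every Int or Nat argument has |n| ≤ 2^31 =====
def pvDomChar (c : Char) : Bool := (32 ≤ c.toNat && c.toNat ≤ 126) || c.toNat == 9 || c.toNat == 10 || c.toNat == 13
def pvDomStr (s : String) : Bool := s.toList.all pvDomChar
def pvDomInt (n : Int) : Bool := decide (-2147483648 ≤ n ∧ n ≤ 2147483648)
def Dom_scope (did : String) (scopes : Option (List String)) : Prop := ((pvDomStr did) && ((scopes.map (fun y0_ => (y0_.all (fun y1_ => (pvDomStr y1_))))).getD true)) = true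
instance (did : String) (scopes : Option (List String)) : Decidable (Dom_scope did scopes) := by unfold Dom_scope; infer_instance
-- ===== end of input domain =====

-- B replaces split/filter/index by a single scan that slices out the second
-- slash-separated component directly (objective: alternative, same O(n) cost).

-- ===== PORT A =====
-- Python A raises ValueError when did does not start with "/"; that branch is
-- excluded by Pre_scope, the port returns a dummy ("", did) there.
def scope (did : String) (scopes : Option (List String)) : String × String :=
  if PySem.Str.startswith did "/" then
    let components := ((PySem.Str.split? did "/").getD []).filter (fun comp => comp ≠ "")
    if components.length < 2 then ("root", did)
    else ((PySem.List.pyGet? components 1).getD "", did)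
  else ("", did)

-- ===== PORT B =====
-- B's while loops over indices are ported as the equivalent structural
-- recursions over the character list (skip slashes / skip component / take component).
def pvSkipSlash : List Char → List Char
  | [] => []
  | c :: r => if c = '/' then pvSkipSlash r else c :: r

def pvSkipComp : List Char → List Char
  | [] => []
  | c :: r => if c = '/' then c :: r else pvSkipComp r

def pvTakeComp : List Char → List Char
  | [] => []
  | c :: r => if c = '/' then [] else c :: pvTakeComp r

def scope_alt (did : String) (scopes : Option (List String)) : String × String :=
  if PySem.Str.startswith did "/" then
    let second := pvTakeComp (pvSkipSlash (pvSkipComp (pvSkipSlash did.toList)))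
    if second = [] then ("root", did) else (String.ofList second, did)
  else ("", did)

-- ===== PRECONDITION & SPEC =====
-- Pre_ excludes exactly the inputs where A raises ValueError (did not starting with "/").
def Pre_scope (did : String) (scopes : Option (List String)) : Prop :=
  PySem.Str.startswith did "/" = true
instance (did : String) (scopes : Option (List String)) : Decidable (Pre_scope did scopes) := by unfold Pre_scope; infer_instance

def pvWitness_scope : String × Option (List String) := ("/cta/user.a/file.fits", none)

def Spec_scope (did : String) (scopes : Option (List String)) (out : String × String) : Prop := out = scope_alt did scopes
instance (did : String) (scopes : Option (List String)) (out : String × String) : Decidable (Spec_scope did scopes out) := by unfold Spec_scope; infer_instance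

-- ===== CLAIM (what is proved, stated in full; the proofs are below) =====
def Claim_equal_scope : Prop := ∀ (did : String) (scopes : Option (List String)), Dom_scope did scopes → Pre_scope did scopes → Spec_scope did scopes (scope did scopes)

-- ===== LEMMAS AND PROOFS =====

-- model of Python's did.split("/") for the single-char separator
def pvPieces : List Char → List (List Char)
  | [] => [[]]
  | c :: r => if c = '/' then [] :: pvPieces r else (pvPieces r).modifyHead (c :: ·)

def pvComps (cs : List Char) : List (List Char) := (pvPieces cs).filter (fun p => p ≠ [])

def pvRest (cs : List Char) : List (List Char) :=
  match pvSkipComp cs with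
  | [] => []
  | _ :: t => pvPieces t

theorem splitOn_go_eq (fuel : Nat) (l cur : List Char) (acc : List (List Char)) (h : l.length < fuel) :
    PySem.Chars.splitOn.go ['/'] fuel l cur acc
      = acc.reverse ++ (pvPieces l).modifyHead (cur.reverse ++ ·) := by
  induction fuel generalizing l cur acc with
  | zero => omega
  | succ f ih =>
    cases l with
    | nil => unfold PySem.Chars.splitOn.go; simp [pvPieces]
    | cons c rest =>
      unfold PySem.Chars.splitOn.go
      by_cases hc : c = '/'
      · subst hc
        have hp : List.isPrefixOf ['/'] ('/' :: rest) = true := by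
          simp [List.isPrefixOf]
        rw [if_pos hp]
        simp only [List.length_cons, List.length_nil, List.drop_succ_cons, List.drop_zero]
        rw [ih rest [] (cur.reverse :: acc) (by simp at h ⊢; omega)]
        simp [pvPieces]
        cases pvPieces rest <;> simp [List.modifyHead]
      · have hp : List.isPrefixOf ['/'] (c :: rest) = false := by
          simp [List.isPrefixOf]; exact fun h' => hc h'.symm
        rw [if_neg (by simp [hp])]
        rw [ih rest (c :: cur) acc (by simp at h ⊢; omega)]
        simp [pvPieces, hc]
        rfl

theorem splitOn_eq_pvPieces (cs : List Char) :
    PySem.Chars.splitOn cs ['/'] = pvPieces cs := by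
  rw [PySem.Chars.splitOn, splitOn_go_eq (cs.length + 1) cs [] [] (by omega)]
  cases h : pvPieces cs <;> simp [List.modifyHead]

theorem pieces_eq_takeComp_cons (cs : List Char) :
    pvPieces cs = pvTakeComp cs :: pvRest cs := by
  induction cs with
  | nil => simp [pvPieces, pvTakeComp, pvRest, pvSkipComp]
  | cons c r ih =>
    by_cases hc : c = '/'
    · subst hc; simp [pvPieces, pvTakeComp, pvRest, pvSkipComp]
    · simp [pvPieces, pvTakeComp, pvRest, pvSkipComp, hc, ih, List.modifyHead]

theorem skipComp_shape (cs : List Char) :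
    pvSkipComp cs = [] ∨ ∃ t, pvSkipComp cs = '/' :: t := by
  induction cs with
  | nil => left; rfl
  | cons c r ih =>
    by_cases hc : c = '/'
    · subst hc; right; exact ⟨r, by simp [pvSkipComp]⟩
    · simpa [pvSkipComp, hc] using ih

theorem comps_headD (cs : List Char) :
    (pvComps cs).headD [] = pvTakeComp (pvSkipSlash cs) := by
  induction cs with
  | nil => simp [pvComps, pvPieces, pvSkipSlash, pvTakeComp]
  | cons c r ih =>
    by_cases hc : c = '/'
    · subst hc; simpa [pvComps, pvPieces, pvSkipSlash] using ih
    · rw [pvComps, pieces_eq_takeComp_cons]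
      simp [pvTakeComp, pvSkipSlash, hc]

theorem comps_tail (cs : List Char) :
    (pvComps cs).tail = pvComps (pvSkipComp (pvSkipSlash cs)) := by
  induction cs with
  | nil => simp [pvComps, pvPieces, pvSkipSlash, pvSkipComp]
  | cons c r ih =>
    by_cases hc : c = '/'
    · subst hc; simpa [pvComps, pvPieces, pvSkipSlash] using ih
    · rw [pvComps, pieces_eq_takeComp_cons]
      have hs : pvSkipSlash (c :: r) = c :: r := by simp [pvSkipSlash, hc]
      rw [hs]
      have ht : pvTakeComp (c :: r) ≠ [] := by simp [pvTakeComp, hc]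
      simp only [List.filter_cons, decide_eq_true_eq]
      rw [if_pos (by simpa using ht)]
      rcases skipComp_shape (c :: r) with h | ⟨t, h⟩
      · rw [h]; simp [pvRest, h, pvComps, pvPieces]
      · rw [h]; simp [pvRest, h, pvComps, pvPieces]

theorem comps_mem_ne_nil {cs : List Char} {p : List Char} (h : p ∈ pvComps cs) : p ≠ [] := by
  have := List.of_mem_filter h
  simpa using this

-- ===== VERDICT (by name: the statement is the Claim_ definition above) =====
theorem components_eq (did : String) :
    ((PySem.Str.split? did "/").getD []).filter (fun comp => comp ≠ "")
      = (pvComps did.toList).map String.ofList := by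
  have h1 : PySem.Str.split? did "/" = some ((pvPieces did.toList).map String.ofList) := by
    simp [PySem.Str.split?, PySem.Chars.split?, splitOn_eq_pvPieces]
  rw [h1]
  simp only [Option.getD_some, pvComps]
  rw [List.filter_map]
  congr 1
  apply List.filter_congr
  intro p _
  simp [Function.comp]

theorem scope_spec : Claim_equal_scope := by
  intro did scopes _ hpre
  unfold Pre_scope at hpre
  unfold Spec_scope scope scope_alt
  rw [if_pos hpre, if_pos hpre]
  simp only [components_eq]
  have hsecond : pvTakeComp (pvSkipSlash (pvSkipComp (pvSkipSlash did.toList)))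
      = ((pvComps did.toList).tail).headD [] := by
    rw [comps_tail, comps_headD]
  rw [hsecond]
  cases hK : pvComps did.toList with
  | nil => simp
  | cons a K' => cases K' with
    | nil => simp
    | cons b rest =>
      have hb : b ≠ [] := comps_mem_ne_nil (cs := did.toList) (by rw [hK]; simp)
      simp [hb, PySem.List.pyGet?, PySem.List.pyIdx?]
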